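-- pv_equiv track=rewrite | github.com/tinkermonkey/switchyard | services/feature_branch_manager.py | create_feature_branch_name
-- ===== SOURCE A (Python) =====
-- def create_feature_branch_name(parent_issue: int, title: str = "") -> str:
--     """Create feature branch name from parent issue"""
--     # Validate issue number
--     if parent_issue <= 0:
--         raise ValueError(f"Invalid issue number: {parent_issue}. Issue numbers must be positive integers.")
--
--     sanitized_title = title.lower().replace(" ", "-")[:30] if title else "feature"
--     # Remove special characters
--     sanitized_title = "".join(c for c in sanitized_title if c.isalnum() or c == "-")
--     # Remove trailing/leading dashes
--     sanitized_title = sanitized_title.strip("-")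
--     # Collapse multiple dashes
--     while "--" in sanitized_title:
--         sanitized_title = sanitized_title.replace("--", "-")
--
--     return f"feature/issue-{parent_issue}-{sanitized_title}"
-- ===== SOURCE B (Python) =====
-- def create_feature_branch_name(parent_issue: int, title: str = "") -> str:
--     """Create feature branch name from parent issue (single-pass sanitizer)."""
--     if parent_issue <= 0:
--         raise ValueError(f"Invalid issue number: {parent_issue}. Issue numbers must be positive integers.")
--
--     base = title.lower().replace(" ", "-")[:30] if title else "feature"
--     # One left-to-right pass: keep alnum chars; keep a dash only when the
--     # output is non-empty and does not already end with a dash.  This fuses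
--     # filtering, dash-collapsing and leading-dash stripping; a single trailing
--     # dash may remain and is popped at the end.
--     kept = []
--     for c in base:
--         if c.isalnum():
--             kept.append(c)
--         elif c == "-" and kept and kept[-1] != "-":
--             kept.append("-")
--     if kept and kept[-1] == "-":
--         kept.pop()
--     return f"feature/issue-{parent_issue}-{''.join(kept)}"
-- ===== Notes on version B (the rewrite author's own statement) =====
-- stated objective: alternative
-- what changed: Replaces A's four-stage pipeline (filter comprehension, strip('-'), and a repeated replace('--','-') while-loop) by a single left-to-right pass that keeps alnum chars and admits a dash only after a non-dash kept char, popping at most one trailing dash at the end; Pre_ excludes only parent_issue <= 0, where A raises ValueError.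
import Mathlib
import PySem

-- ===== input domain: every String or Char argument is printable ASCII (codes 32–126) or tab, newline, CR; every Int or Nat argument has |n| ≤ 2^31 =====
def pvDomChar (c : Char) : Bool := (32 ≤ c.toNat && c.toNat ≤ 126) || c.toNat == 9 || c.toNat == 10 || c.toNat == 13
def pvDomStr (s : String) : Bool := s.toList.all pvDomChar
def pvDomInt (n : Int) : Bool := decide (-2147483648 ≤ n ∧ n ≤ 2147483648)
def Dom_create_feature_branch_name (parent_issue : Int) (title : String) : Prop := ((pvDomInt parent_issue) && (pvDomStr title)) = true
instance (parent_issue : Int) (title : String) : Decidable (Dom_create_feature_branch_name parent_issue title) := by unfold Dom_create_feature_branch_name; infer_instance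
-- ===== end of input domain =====

-- B replaces A's four-stage sanitizer (filter, strip('-'), repeated replace('--','-'))
-- by a single left-to-right pass over the base string; return values proved equal for
-- every parent_issue > 0 (A raises ValueError otherwise).


-- ===== PORT A =====
-- the 'while "--" in s: s = s.replace("--","-")' loop; fuel = current length is enough,
-- since each round with "--" present strictly shortens the string
def pvCollapseLoop (fuel : Nat) (s : List Char) : List Char :=
  match fuel with
  | 0 => s
  | fuel + 1 =>
    if PySem.Chars.isIn ['-', '-'] s then
      pvCollapseLoop fuel (PySem.Chars.replace s ['-', '-'] ['-'])
    else s

def create_feature_branch_name (parent_issue : Int) (title : String) : String :=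
  let base : List Char :=
    if title.toList ≠ [] then
      PySem.Chars.slice (PySem.Chars.replace (PySem.Chars.lower title.toList) [' '] ['-']) none (some 30)
    else "feature".toList
  let s1 := base.filter (fun c => PySem.Chars.isalnum c || c == '-')
  let s2 := PySem.Chars.stripChars s1 ['-']
  let s3 := pvCollapseLoop s2.length s2
  String.ofList ("feature/issue-".toList ++ PySem.Int.toChars parent_issue ++ ['-'] ++ s3)

-- ===== PORT B =====
-- the single pass of Source B: append alnum chars; append '-' only when kept is
-- non-empty and does not already end with '-'
def pvBLoop (acc : List Char) (cs : List Char) : List Char :=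
  match cs with
  | [] => acc
  | c :: rest =>
    if PySem.Chars.isalnum c then pvBLoop (acc ++ [c]) rest
    else if c == '-' && !acc.isEmpty && acc.getLast? != some '-' then pvBLoop (acc ++ [c]) rest
    else pvBLoop acc rest

def create_feature_branch_name_alt (parent_issue : Int) (title : String) : String :=
  let base : List Char :=
    if title.toList ≠ [] then
      PySem.Chars.slice (PySem.Chars.replace (PySem.Chars.lower title.toList) [' '] ['-']) none (some 30)
    else "feature".toList
  let kept := pvBLoop [] base
  let kept2 := if !kept.isEmpty && kept.getLast? == some '-' then kept.dropLast else kept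
  String.ofList ("feature/issue-".toList ++ PySem.Int.toChars parent_issue ++ ['-'] ++ kept2)

-- ===== PRECONDITION & SPEC =====
-- A raises ValueError exactly when parent_issue <= 0; Pre_ excludes only those inputs
def Pre_create_feature_branch_name (parent_issue : Int) (title : String) : Prop := 0 < parent_issue
instance (parent_issue : Int) (title : String) : Decidable (Pre_create_feature_branch_name parent_issue title) := by unfold Pre_create_feature_branch_name; infer_instance
def pvWitness_create_feature_branch_name : Int × String := (3, "My Feature 2!")

def Spec_create_feature_branch_name (parent_issue : Int) (title : String) (out : String) : Prop := out = create_feature_branch_name_alt parent_issue title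
instance (parent_issue : Int) (title : String) (out : String) : Decidable (Spec_create_feature_branch_name parent_issue title out) := by unfold Spec_create_feature_branch_name; infer_instance

-- ===== CLAIM (what is proved, stated in full; the proofs are below) =====
def Claim_equal_create_feature_branch_name : Prop := ∀ (parent_issue : Int) (title : String), Dom_create_feature_branch_name parent_issue title → Pre_create_feature_branch_name parent_issue title → Spec_create_feature_branch_name parent_issue title (create_feature_branch_name parent_issue title)

-- ===== LEMMAS AND PROOFS =====

def pvSqueeze : List Char → List Char
  | [] => []
  | c :: t =>
    if c = '-' then '-' :: pvSqueeze (t.dropWhile (fun d => d == '-'))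
    else c :: pvSqueeze t
termination_by s => s.length
decreasing_by
  · have := List.length_dropWhile_le (fun d : Char => d == '-') t
    simp; omega
  · simp

theorem squeeze_cons_dash (t : List Char) :
    pvSqueeze ('-' :: t) = '-' :: pvSqueeze (t.dropWhile (fun d => d == '-')) := by
  rw [pvSqueeze]; simp

theorem squeeze_cons_ne (c : Char) (t : List Char) (h : c ≠ '-') :
    pvSqueeze (c :: t) = c :: pvSqueeze t := by
  rw [pvSqueeze]; simp [h]

theorem squeeze_eq_nil_iff (s : List Char) : pvSqueeze s = [] ↔ s = [] := by
  cases s with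
  | nil => simp [pvSqueeze]
  | cons c t =>
    by_cases hc : c = '-'
    · subst hc; rw [squeeze_cons_dash]; simp
    · rw [squeeze_cons_ne c t hc]; simp

theorem head?_dropWhile_ne {p : Char → Bool} (l : List Char) (a : Char)
    (h : (l.dropWhile p).head? = some a) : p a = false := by
  induction l with
  | nil => simp at h
  | cons c t ih =>
    rw [List.dropWhile_cons] at h
    split at h
    · exact ih h
    · simp at h; subst h; simpa using ‹¬ p c = true›

theorem dropWhile_eq_self_of_head (t : List Char) (h : t.head? ≠ some '-') :
    t.dropWhile (fun d => d == '-') = t := by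
  cases t with
  | nil => rfl
  | cons c r =>
    have : c ≠ '-' := by intro hc; exact h (by simp [hc])
    simp [List.dropWhile_cons, this]

theorem dropWhile_rep (k : Nat) (t : List Char) (h : t.head? ≠ some '-') :
    (List.replicate k '-' ++ t).dropWhile (fun d => d == '-') = t := by
  induction k with
  | zero => simpa using dropWhile_eq_self_of_head t h
  | succ k ih => simpa [List.replicate_succ, List.dropWhile_cons] using ih

theorem squeeze_rep_cons (k : Nat) (t : List Char) (hk : 0 < k) (h : t.head? ≠ some '-') :
    pvSqueeze (List.replicate k '-' ++ t) = '-' :: pvSqueeze t := by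
  cases k with
  | zero => omega
  | succ k =>
    rw [List.replicate_succ, List.cons_append, squeeze_cons_dash, dropWhile_rep k t h]

def pvHalve : List Char → List Char
  | '-' :: '-' :: t => '-' :: pvHalve t
  | c :: t => c :: pvHalve t
  | [] => []

theorem halve_length_le (s : List Char) : (pvHalve s).length ≤ s.length := by
  induction s using pvHalve.induct <;> simp [pvHalve] <;> omega

theorem halve_cons (c : Char) (t : List Char) (h : ¬(c = '-' ∧ t.head? = some '-')) :
    pvHalve (c :: t) = c :: pvHalve t := by
  rw [pvHalve.eq_def]
  split
  · rename_i t' heq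
    rw [List.cons.injEq] at heq
    exact absurd ⟨heq.1, by rw [heq.2]; rfl⟩ h
  · rename_i heq
    rw [List.cons.injEq] at heq
    rw [heq.1, heq.2]
  · rename_i heq
    exact absurd heq (by simp)

theorem head?_halve (t : List Char) : (pvHalve t).head? = t.head? := by
  induction t using pvHalve.induct <;> simp [pvHalve]

theorem halve_length_lt (s : List Char) (h : ['-', '-'] <:+: s) :
    (pvHalve s).length < s.length := by
  induction s using pvHalve.induct with
  | case1 t _ =>
    have := halve_length_le t
    simp [pvHalve]; omega
  | case2 c t hnd ih =>
    have hcc : ¬(c = '-' ∧ t.head? = some '-') := by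
      rintro ⟨rfl, hh⟩
      rcases t with _ | ⟨d, t'⟩ <;> simp at hh
      subst hh
      exact hnd t' rfl rfl
    have hdd : ['-', '-'] <:+: t := by
      rcases List.infix_cons_iff.mp h with hp | hi
      · rcases hp with ⟨r, hr⟩
        simp only [List.cons_append, List.nil_append, List.cons.injEq] at hr
        exact absurd ⟨hr.1.symm, by rw [← hr.2]; rfl⟩ hcc
      · exact hi
    rw [halve_cons c t hcc]
    have := ih hdd
    simp only [List.length_cons]
    omega
  | case3 => simp at h

theorem halve_rep (k : Nat) (t : List Char) (ht : t.head? ≠ some '-') :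
    pvHalve (List.replicate k '-' ++ t) = List.replicate ((k + 1) / 2) '-' ++ pvHalve t := by
  induction k using Nat.strong_induction_on with
  | _ k ih =>
    match k with
    | 0 => simp
    | 1 =>
      rw [show List.replicate 1 '-' ++ t = '-' :: t from by simp]
      rw [halve_cons '-' t (by rintro ⟨-, hh⟩; exact ht hh)]
      simp
    | (k + 2) =>
      rw [show List.replicate (k + 2) '-' ++ t = '-' :: '-' :: (List.replicate k '-' ++ t) from by
        simp [List.replicate_succ]]
      rw [show pvHalve ('-' :: '-' :: (List.replicate k '-' ++ t)) =
            '-' :: pvHalve (List.replicate k '-' ++ t) from rfl]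
      rw [ih k (by omega) ]
      rw [show (k + 2 + 1) / 2 = (k + 1) / 2 + 1 from by omega]
      simp [List.replicate_succ]

theorem squeeze_eq_self (s : List Char) (h : ¬ (['-', '-'] <:+: s)) : pvSqueeze s = s := by
  induction s with
  | nil => simp [pvSqueeze]
  | cons c t ih =>
    have hdd : ¬ (['-', '-'] <:+: t) := fun hi => h (List.infix_cons hi)
    by_cases hc : c = '-'
    · subst hc
      have hh : t.head? ≠ some '-' := by
        intro hh
        rcases t with _ | ⟨d, t'⟩ <;> simp at hh
        subst hh
        exact h ⟨[], t', by simp⟩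
      rw [squeeze_cons_dash, dropWhile_eq_self_of_head t hh, ih hdd]
    · rw [squeeze_cons_ne c t hc, ih hdd]

theorem mem_takeWhile_dash (t : List Char) (b : Char)
    (hb : b ∈ t.takeWhile (fun d => d == '-')) : b = '-' := by
  simpa using List.mem_takeWhile_imp hb

theorem squeeze_halve_aux (n : Nat) : ∀ s : List Char, s.length ≤ n →
    pvSqueeze (pvHalve s) = pvSqueeze s := by
  induction n with
  | zero =>
    intro s h
    have : s = [] := by cases s <;> simp_all
    subst this; simp [pvSqueeze, pvHalve]
  | succ n ih =>
    intro s h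
    rcases s with _ | ⟨c, t⟩
    · simp [pvSqueeze, pvHalve]
    by_cases hc : c = '-'
    · subst hc
      set k := (('-' :: t).takeWhile (fun d => d == '-')).length with hk
      set r := ('-' :: t).dropWhile (fun d => d == '-') with hr
      have hsplit : '-' :: t = List.replicate k '-' ++ r := by
        conv_lhs => rw [← List.takeWhile_append_dropWhile (p := fun d => d == '-') (l := '-' :: t)]
        rw [← hr]
        congr 1
        exact List.eq_replicate_of_mem (fun b hb => mem_takeWhile_dash _ b hb)
      have hkpos : 0 < k := by simp [hk, List.takeWhile_cons]
      have hrhead : r.head? ≠ some '-' := by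
        intro hh
        have := head?_dropWhile_ne (p := fun d => d == '-') ('-' :: t) '-' (hr ▸ hh)
        simp at this
      have hrlen : r.length ≤ t.length := by
        have : r = t.dropWhile (fun d => d == '-') := by simp [hr, List.dropWhile_cons]
        rw [this]; exact List.length_dropWhile_le _ t
      rw [hsplit, halve_rep k r hrhead]
      rw [squeeze_rep_cons k r hkpos hrhead]
      rw [squeeze_rep_cons ((k + 1) / 2) (pvHalve r) (by omega)
        (by rw [head?_halve]; exact hrhead)]
      rw [ih r (by simp at h; omega)]
    · have hcc : ¬(c = '-' ∧ t.head? = some '-') := fun hx => hc hx.1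
      rw [halve_cons c t hcc, squeeze_cons_ne _ _ hc, squeeze_cons_ne _ _ hc,
        ih t (by simp at h; omega)]

theorem squeeze_halve (s : List Char) : pvSqueeze (pvHalve s) = pvSqueeze s :=
  squeeze_halve_aux s.length s le_rfl

theorem replace_go_eq (fuel : Nat) : ∀ (l acc : List Char), l.length ≤ fuel →
    PySem.Chars.replace.go ['-', '-'] ['-'] fuel l acc = acc.reverse ++ pvHalve l := by
  induction fuel with
  | zero =>
    intro l acc h
    have : l = [] := by cases l <;> simp_all
    subst this
    rw [PySem.Chars.replace.go]
    simp [pvHalve]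
  | succ fuel ih =>
    intro l acc h
    match l with
    | [] => rw [PySem.Chars.replace.go.eq_def]; simp [pvHalve]
    | c :: t =>
      rw [PySem.Chars.replace.go]
      by_cases hp : (['-', '-'] : List Char).isPrefixOf (c :: t)
      · simp only [hp, if_true]
        rcases t with _ | ⟨d, t⟩
        · simp [List.isPrefixOf] at hp
        · simp [List.isPrefixOf, beq_iff_eq] at hp
          obtain ⟨rfl, rfl⟩ := hp
          have := ih t ('-' :: acc) (by simp at h; omega)
          simpa [pvHalve] using this
      · simp only [hp, if_false]
        rw [ih t (c :: acc) (by simp at h; omega)]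
        have hcc : ¬(c = '-' ∧ t.head? = some '-') := by
          rintro ⟨rfl, hh⟩
          rcases t with _ | ⟨d, t⟩ <;> simp at hh
          subst hh
          simp [List.isPrefixOf] at hp
        rw [halve_cons c t hcc]
        simp

theorem replace_dd (s : List Char) : PySem.Chars.replace s ['-', '-'] ['-'] = pvHalve s := by
  rw [PySem.Chars.replace]
  simp [replace_go_eq s.length s [] le_rfl]

theorem collapse_eq_squeeze (fuel : Nat) : ∀ s : List Char, s.length ≤ fuel →
    pvCollapseLoop fuel s = pvSqueeze s := by
  induction fuel with
  | zero =>
    intro s h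
    have : s = [] := by cases s <;> simp_all
    subst this; simp [pvCollapseLoop, pvSqueeze]
  | succ fuel ih =>
    intro s h
    rw [pvCollapseLoop]
    by_cases hin : PySem.Chars.isIn ['-', '-'] s = true
    · have hdd := (PySem.Chars.isIn_iff_infix _ _).mp hin
      rw [hin, if_pos rfl, replace_dd]
      rw [ih (pvHalve s) (by have := halve_length_lt s hdd; omega)]
      exact squeeze_halve s
    · simp only [Bool.not_eq_true] at hin
      rw [hin, if_neg (by simp)]
      exact (squeeze_eq_self s ((PySem.Chars.isIn_eq_false_iff _ _).mp hin)).symm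

theorem getLast?_cons_ne (a : Char) (t : List Char) (h : t ≠ []) :
    (a :: t).getLast? = t.getLast? := by
  have := List.getLast?_append_of_ne_nil [a] (l₂ := t) h
  simpa using this

theorem dropWhile_facts (t : List Char) (h0 : t ≠ []) (hl : t.getLast? ≠ some '-') :
    t.dropWhile (fun d => d == '-') ≠ [] ∧
    (t.dropWhile (fun d => d == '-')).getLast? = t.getLast? ∧
    ∀ u : List Char, (t ++ u).dropWhile (fun d => d == '-') =
      t.dropWhile (fun d => d == '-') ++ u := by
  induction t with
  | nil => exact absurd rfl h0
  | cons a t ih =>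
    by_cases ha : a = '-'
    · subst ha
      have ht : t ≠ [] := by rintro rfl; simp at hl
      have hlt : t.getLast? ≠ some '-' := by rwa [getLast?_cons_ne _ _ ht] at hl
      obtain ⟨i1, i2, i3⟩ := ih ht hlt
      refine ⟨by simpa [List.dropWhile_cons] using i1,
        by simpa [List.dropWhile_cons, getLast?_cons_ne _ _ ht] using i2, ?_⟩
      intro u
      simpa [List.dropWhile_cons] using i3 u
    · have hb : (a == '-') = false := by simpa using ha
      refine ⟨by simp [List.dropWhile_cons, hb], by simp [List.dropWhile_cons, hb], ?_⟩
      intro u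
      simp [List.dropWhile_cons, hb]

theorem squeeze_rep_nil (k : Nat) (hk : 0 < k) :
    pvSqueeze (List.replicate k '-') = ['-'] := by
  have := squeeze_rep_cons k [] hk (by simp)
  simpa [pvSqueeze] using this

theorem squeeze_append_rep_aux (n : Nat) : ∀ ws : List Char, ws.length ≤ n →
    ∀ k : Nat, 0 < k → ws.getLast? ≠ some '-' →
    pvSqueeze (ws ++ List.replicate k '-') = pvSqueeze ws ++ ['-'] := by
  induction n with
  | zero =>
    intro ws h k hk hl
    have : ws = [] := by cases ws <;> simp_all
    subst this
    simpa [pvSqueeze] using squeeze_rep_nil k hk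
  | succ n ih =>
    intro ws h k hk hl
    rcases ws with _ | ⟨a, t⟩
    · simpa [pvSqueeze] using squeeze_rep_nil k hk
    by_cases ha : a = '-'
    · subst ha
      have ht : t ≠ [] := by rintro rfl; simp at hl
      have hlt : t.getLast? ≠ some '-' := by rwa [getLast?_cons_ne _ _ ht] at hl
      obtain ⟨i1, i2, i3⟩ := dropWhile_facts t ht hlt
      rw [List.cons_append, squeeze_cons_dash, i3 (List.replicate k '-'),
        squeeze_cons_dash]
      have hlen : (t.dropWhile (fun d => d == '-')).length ≤ n := by
        have := List.length_dropWhile_le (fun d : Char => d == '-') t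
        simp at h; omega
      rw [ih _ hlen k hk (i2 ▸ hlt)]
      simp
    · rcases t with _ | ⟨b, t⟩
      · rw [List.cons_append, squeeze_cons_ne _ _ ha, squeeze_cons_ne _ _ ha]
        simp only [List.nil_append]
        rw [squeeze_rep_nil k hk]
        simp [pvSqueeze]
      · have ht : (b :: t) ≠ [] := by simp
        have hlt : (b :: t).getLast? ≠ some '-' := by
          rwa [getLast?_cons_ne _ _ ht] at hl
        rw [List.cons_append, squeeze_cons_ne _ _ ha, squeeze_cons_ne _ _ ha,
          ih (b :: t) (by simp at h ⊢; omega) k hk hlt]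
        simp

theorem squeeze_append_rep (ws : List Char) (k : Nat) (hk : 0 < k)
    (hl : ws.getLast? ≠ some '-') :
    pvSqueeze (ws ++ List.replicate k '-') = pvSqueeze ws ++ ['-'] :=
  squeeze_append_rep_aux ws.length ws le_rfl k hk hl

theorem squeeze_getLast_ne_aux (n : Nat) : ∀ ws : List Char, ws.length ≤ n →
    ws.getLast? ≠ some '-' → (pvSqueeze ws).getLast? ≠ some '-' := by
  induction n with
  | zero =>
    intro ws h hl
    have : ws = [] := by cases ws <;> simp_all
    subst this; simp [pvSqueeze]
  | succ n ih =>
    intro ws h hl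
    rcases ws with _ | ⟨a, t⟩
    · simp [pvSqueeze]
    by_cases ha : a = '-'
    · subst ha
      have ht : t ≠ [] := by rintro rfl; simp at hl
      have hlt : t.getLast? ≠ some '-' := by rwa [getLast?_cons_ne _ _ ht] at hl
      obtain ⟨i1, i2, -⟩ := dropWhile_facts t ht hlt
      rw [squeeze_cons_dash]
      have hlen : (t.dropWhile (fun d => d == '-')).length ≤ n := by
        have := List.length_dropWhile_le (fun d : Char => d == '-') t
        simp at h; omega
      have hne := ih _ hlen (i2 ▸ hlt)
      have hnn : pvSqueeze (t.dropWhile (fun d => d == '-')) ≠ [] := by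
        rw [Ne, squeeze_eq_nil_iff]; exact i1
      rwa [getLast?_cons_ne _ _ hnn]
    · rw [squeeze_cons_ne _ _ ha]
      rcases t with _ | ⟨b, t⟩
      · simpa [pvSqueeze] using ha
      · have ht : (b :: t) ≠ [] := by simp
        have hlt : (b :: t).getLast? ≠ some '-' := by
          rwa [getLast?_cons_ne _ _ ht] at hl
        have hne := ih (b :: t) (by simp at h ⊢; omega) hlt
        have hnn : pvSqueeze (b :: t) ≠ [] := by
          rw [Ne, squeeze_eq_nil_iff]; exact ht
        rwa [getLast?_cons_ne _ _ hnn]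

theorem squeeze_getLast_ne (ws : List Char) (hl : ws.getLast? ≠ some '-') :
    (pvSqueeze ws).getLast? ≠ some '-' :=
  squeeze_getLast_ne_aux ws.length ws le_rfl hl

def pvNorm : Bool → List Char → List Char
  | _, [] => []
  | b, c :: r =>
    if PySem.Chars.isalnum c then c :: pvNorm true r
    else if c == '-' && b then '-' :: pvNorm false r
    else pvNorm b r

theorem isalnum_ne_dash (c : Char) (h : PySem.Chars.isalnum c = true) : c ≠ '-' := by
  rintro rfl
  simp [PySem.Chars.isalnum, PySem.Chars.isalpha, PySem.Chars.isdigit,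
    PySem.Chars.isupper, PySem.Chars.islower] at h

theorem bLoop_eq_norm (cs : List Char) : ∀ acc : List Char,
    pvBLoop acc cs = acc ++ pvNorm (!acc.isEmpty && acc.getLast? != some '-') cs := by
  induction cs with
  | nil => intro acc; simp [pvBLoop, pvNorm]
  | cons c rest ih =>
    intro acc
    rw [pvBLoop, pvNorm]
    by_cases h1 : PySem.Chars.isalnum c = true
    · rw [if_pos h1, if_pos h1, ih]
      have hc : (some c != some '-') = true := by
        simpa using isalnum_ne_dash c h1
      have he : (acc ++ [c]).isEmpty = false := by simp
      simp [hc, he]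
    · rw [if_neg h1, if_neg h1]
      by_cases h2 : (c == '-' && !acc.isEmpty && acc.getLast? != some '-') = true
      · have hc : c = '-' := by
          have := h2
          simp only [Bool.and_assoc, Bool.and_eq_true, beq_iff_eq] at this
          exact this.1
        rw [if_pos h2, ih, if_pos (by
          simp only [Bool.and_assoc, Bool.and_eq_true, beq_iff_eq] at h2 ⊢
          exact ⟨hc, h2.2⟩)]
        subst hc
        simp
      · rw [if_neg h2, ih, if_neg (by
          simp only [Bool.and_assoc, Bool.and_eq_true, beq_iff_eq] at h2 ⊢
          exact h2)]

theorem norm_filter (cs : List Char) : ∀ b : Bool,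
    pvNorm b cs = pvNorm b (cs.filter (fun c => PySem.Chars.isalnum c || c == '-')) := by
  induction cs with
  | nil => intro b; simp
  | cons c rest ih =>
    intro b
    by_cases h1 : PySem.Chars.isalnum c = true
    · rw [pvNorm, if_pos h1]
      rw [List.filter_cons_of_pos (by simp [h1])]
      rw [pvNorm, if_pos h1, ih]
    · by_cases h2 : c = '-'
      · subst h2
        rw [List.filter_cons_of_pos (by simp)]
        rw [pvNorm, pvNorm, if_neg h1, if_neg h1, ih]
        by_cases hb : b <;> simp [hb] <;> rw [ih]
      · rw [pvNorm, if_neg h1, if_neg (by simp [h2])]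
        rw [List.filter_cons_of_neg (by simp [h1, h2])]
        exact ih b

theorem norm_eq_squeeze (cs : List Char)
    (h : ∀ c ∈ cs, (PySem.Chars.isalnum c || c == '-') = true) :
    pvNorm true cs = pvSqueeze cs ∧
      pvNorm false cs = pvSqueeze (cs.dropWhile (fun d => d == '-')) := by
  induction cs with
  | nil => simp [pvNorm, pvSqueeze]
  | cons c rest ih =>
    have hrest : ∀ c ∈ rest, (PySem.Chars.isalnum c || c == '-') = true :=
      fun x hx => h x (List.mem_cons_of_mem _ hx)
    obtain ⟨ih1, ih2⟩ := ih hrest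
    by_cases h1 : PySem.Chars.isalnum c = true
    · have hc : c ≠ '-' := isalnum_ne_dash c h1
      constructor
      · rw [pvNorm, if_pos h1, ih1, ← squeeze_cons_ne c rest hc]
      · rw [pvNorm, if_pos h1, ih1, List.dropWhile_cons, if_neg (by simpa using hc),
          ← squeeze_cons_ne c rest hc]
    · have hc : c = '-' := by
        have := h c List.mem_cons_self
        simpa [h1] using this
      subst hc
      constructor
      · rw [pvNorm, if_neg h1, if_pos (by simp), ih2, squeeze_cons_dash]
      · rw [pvNorm, if_neg h1, if_neg (by simp), ih2]
        rw [List.dropWhile_cons, if_pos (by simp)]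

theorem strip_eq (ys : List Char) :
    PySem.Chars.stripChars ys ['-'] =
      ((ys.dropWhile (fun d => d == '-')).reverse.dropWhile (fun d => d == '-')).reverse := by
  rw [PySem.Chars.stripChars]
  have hp : (fun c => (['-'] : List Char).contains c) = (fun d : Char => d == '-') := by
    funext c
    simp only [List.contains_cons, List.contains_nil, Bool.or_false]
  rw [hp]

theorem rstrip_decomp (zs : List Char) :
    ∃ k : Nat,
      zs = (zs.reverse.dropWhile (fun d => d == '-')).reverse ++ List.replicate k '-' ∧
      ((zs.reverse.dropWhile (fun d => d == '-')).reverse).getLast? ≠ some '-' := by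
  refine ⟨(zs.reverse.takeWhile (fun d => d == '-')).length, ?_, ?_⟩
  · conv_lhs => rw [← List.reverse_reverse zs]
    conv_lhs =>
      rw [← List.takeWhile_append_dropWhile (p := fun d => d == '-') (l := zs.reverse)]
    rw [List.reverse_append]
    congr 1
    conv_lhs =>
      rw [List.eq_replicate_of_mem (l := zs.reverse.takeWhile (fun d => d == '-'))
        (fun b hb => mem_takeWhile_dash _ b hb)]
    rw [List.reverse_replicate]
  · rw [List.getLast?_reverse]
    intro hh
    have := head?_dropWhile_ne (p := fun d => d == '-') zs.reverse '-' hh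
    simp at this

theorem tails_eq (base : List Char) :
    (let kept := pvBLoop [] base
     if !kept.isEmpty && kept.getLast? == some '-' then kept.dropLast else kept) =
    (let s1 := base.filter (fun c => PySem.Chars.isalnum c || c == '-')
     let s2 := PySem.Chars.stripChars s1 ['-']
     pvCollapseLoop s2.length s2) := by
  simp only []
  set ys := base.filter (fun c => PySem.Chars.isalnum c || c == '-') with hys
  set zs := ys.dropWhile (fun d => d == '-') with hzs
  have hb : pvBLoop [] base = pvSqueeze zs := by
    have h1 := bLoop_eq_norm base []
    simp only [List.isEmpty_nil, Bool.not_true, List.getLast?_nil, Bool.false_and,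
      List.nil_append] at h1
    rw [h1, norm_filter base false, ← hys,
      (norm_eq_squeeze ys (fun c hc => (List.mem_filter.mp hc).2)).2]
  have hstrip : PySem.Chars.stripChars ys ['-'] =
      (zs.reverse.dropWhile (fun d => d == '-')).reverse := strip_eq ys
  rw [hb, hstrip, collapse_eq_squeeze _ _ le_rfl]
  obtain ⟨k, hsplit, hlast⟩ := rstrip_decomp zs
  set ws := (zs.reverse.dropWhile (fun d => d == '-')).reverse with hws
  rcases Nat.eq_zero_or_pos k with rfl | hk
  · simp only [List.replicate_zero, List.append_nil] at hsplit
    rw [hsplit]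
    have := squeeze_getLast_ne ws hlast
    have hcond : ((pvSqueeze ws).getLast? == some '-') = false := by
      simpa using this
    simp [hcond]
  · rw [hsplit, squeeze_append_rep ws k hk hlast]
    have hcond : ((pvSqueeze ws ++ ['-']).getLast? == some '-') = true := by
      simp [List.getLast?_concat]
    have hne : (pvSqueeze ws ++ ['-']).isEmpty = false := by simp
    simp only [hne, hcond, Bool.not_false, Bool.and_self, if_pos]
    rw [List.dropLast_concat]

-- ===== VERDICT (by name: the statement is the Claim_ definition above) =====
theorem create_feature_branch_name_spec : Claim_equal_create_feature_branch_name := by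
  intro parent_issue title _ _
  unfold Spec_create_feature_branch_name create_feature_branch_name create_feature_branch_name_alt
  have := tails_eq (if title.toList ≠ [] then
      PySem.Chars.slice (PySem.Chars.replace (PySem.Chars.lower title.toList) [' '] ['-']) none (some 30)
    else "feature".toList)
  simp only at this ⊢
  rw [this]
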